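-- pv_equiv track=rewrite | github.com/jonvag/HACK4-python-2 | hack_1.py | fn_hack_1
-- ===== SOURCE A (Python) =====
-- def fn_hack_1(palabra):
--
--     result = ''
--     i=0
--     for x in palabra:
--         if i == 1:
--             if x in ('a', 'e', 'i' , 'o', 'u'): #aplica upper solo cuando es vocal
--                 x = x.upper()
--
--             i = -2                    #aplica -2 reinicio el contador de letra, ya que cada 3er digito es mayuscula excepto la primera vez
--         result = result  + x
--         i += 1
--
--     return result
-- ===== SOURCE B (Python) =====
-- def fn_hack_1(palabra):
--     parts = []
--     rest = palabra
--     while rest: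
--         chunk, rest = rest[:3], rest[3:]
--         if len(chunk) >= 2 and chunk[1] in 'aeiou':
--             chunk = chunk[0] + chunk[1].upper() + chunk[2:]
--         parts.append(chunk)
--     return ''.join(parts)
-- ===== Notes on version B (the rewrite author's own statement) =====
-- stated objective: simpler
-- what changed: Replaces A's per-character loop with a counter that is reset to -2 after each uppercase by a loop that peels the string into blocks of three and uppercases each block's second character when it is a lowercase vowel.
import Mathlib
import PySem

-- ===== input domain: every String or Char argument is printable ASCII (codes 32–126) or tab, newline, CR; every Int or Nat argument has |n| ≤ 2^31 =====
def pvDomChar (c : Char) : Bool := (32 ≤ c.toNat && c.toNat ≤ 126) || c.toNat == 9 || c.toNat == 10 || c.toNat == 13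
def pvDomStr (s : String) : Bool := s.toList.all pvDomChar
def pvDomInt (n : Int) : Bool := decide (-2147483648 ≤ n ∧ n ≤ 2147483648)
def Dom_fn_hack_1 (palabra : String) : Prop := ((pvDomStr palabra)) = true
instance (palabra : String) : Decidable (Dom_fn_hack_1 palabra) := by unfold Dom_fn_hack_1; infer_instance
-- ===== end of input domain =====

-- B replaces A's per-character loop with a resetting counter by processing the string in
-- blocks of three and uppercasing each block's second character when it is a vowel (simpler decomposition).

-- ===== PORT A =====
-- one iteration of A's for-loop: state = (result so far, counter i)
def pvStepA (st : List Char × Int) (x : Char) : List Char × Int :=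
  let p :=
    if st.2 = 1 then
      (if x ∈ ['a', 'e', 'i', 'o', 'u'] then PySem.Chars.upperChar x else x, (-2 : Int))
    else (x, st.2)
  (st.1 ++ [p.1], p.2 + 1)

def fn_hack_1 (palabra : String) : String :=
  String.mk (palabra.toList.foldl pvStepA ([], 0)).1

-- ===== PORT B =====
-- the chunk fix-up: if len(chunk) >= 2 and chunk[1] is a vowel, uppercase chunk[1]
def pvFixChunk (chunk : List Char) : List Char :=
  match chunk with
  | a :: b :: rest =>
      if b ∈ ['a', 'e', 'i', 'o', 'u'] then a :: PySem.Chars.upperChar b :: rest else chunk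
  | _ => chunk

-- the while loop: peel off rest[:3], fix it, continue on rest[3:]; joining parts = concatenation
def pvAltGo : List Char → List Char
  | [] => []
  | x :: rest' => pvFixChunk ((x :: rest').take 3) ++ pvAltGo ((x :: rest').drop 3)
  termination_by cs => cs.length
  decreasing_by simp

def fn_hack_1_alt (palabra : String) : String :=
  String.mk (pvAltGo palabra.toList)

-- ===== PRECONDITION & SPEC =====
def Spec_fn_hack_1 (palabra : String) (out : String) : Prop := out = fn_hack_1_alt palabra
instance (palabra : String) (out : String) : Decidable (Spec_fn_hack_1 palabra out) := by unfold Spec_fn_hack_1; infer_instance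

-- ===== CLAIM (what is proved, stated in full; the proofs are below) =====
def Claim_equal_fn_hack_1 : Prop := ∀ (palabra : String), Dom_fn_hack_1 palabra → Spec_fn_hack_1 palabra (fn_hack_1 palabra)

-- ===== LEMMAS AND PROOFS =====

@[simp] theorem pvAltGo_nil : pvAltGo [] = [] := by rw [pvAltGo]
@[simp] theorem pvAltGo_cons (x : Char) (rest' : List Char) :
    pvAltGo (x :: rest') = pvFixChunk ((x :: rest').take 3) ++ pvAltGo ((x :: rest').drop 3) := by
  rw [pvAltGo]

-- A's fold from counter 0 produces exactly B's block decomposition, for any accumulator.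
theorem pv_main : ∀ (cs acc : List Char), (cs.foldl pvStepA (acc, 0)).1 = acc ++ pvAltGo cs
  | [], acc => by simp
  | [a], acc => by simp [pvFixChunk, pvStepA]
  | [a, b], acc => by
      simp only [List.foldl, pvStepA]
      by_cases h : b = 'a' ∨ b = 'e' ∨ b = 'i' ∨ b = 'o' ∨ b = 'u' <;> simp [h, pvFixChunk]
  | a :: b :: c :: rest, acc => by
      have ih := pv_main rest
        (acc ++ [a] ++ [if b ∈ ['a', 'e', 'i', 'o', 'u'] then PySem.Chars.upperChar b else b] ++ [c])
      simp only [List.foldl, pvStepA] at ih ⊢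
      norm_num at ih ⊢
      rw [ih]
      by_cases h : b = 'a' ∨ b = 'e' ∨ b = 'i' ∨ b = 'o' ∨ b = 'u' <;> simp [h, pvFixChunk]

-- ===== VERDICT (by name: the statement is the Claim_ definition above) =====
theorem fn_hack_1_spec : Claim_equal_fn_hack_1 := by
  intro palabra _
  unfold Spec_fn_hack_1 fn_hack_1 fn_hack_1_alt
  rw [pv_main]
  simp
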